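-- pv_equiv track=rewrite | github.com/pypi-data/pypi-mirror-376 | packages/devix/devix-2.1.8.tar.gz/devix-2.1.8/src/devix/reporting/enhanced_generator.py | _determine_issue_severity
-- ===== SOURCE A (Python) =====
-- def _determine_issue_severity(issue: str, analyzer_name: str) -> str:
--     """Determine issue severity (reused from base formatter)."""
--     issue_lower = issue.lower()
--
--     if analyzer_name == 'security':
--         if any(word in issue_lower for word in ['critical', 'high', 'severe']):
--             return 'critical'
--         elif any(word in issue_lower for word in ['medium', 'moderate']):
--             return 'medium'
--         return 'high'
--     elif analyzer_name == 'performance':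
--         if any(word in issue_lower for word in ['critical', 'severe', 'blocking']):
--             return 'high'
--         elif any(word in issue_lower for word in ['slow', 'inefficient']):
--             return 'medium'
--         return 'low'
--     elif analyzer_name == 'quality':
--         if any(word in issue_lower for word in ['error', 'critical', 'fatal']):
--             return 'high'
--         elif any(word in issue_lower for word in ['warning', 'style']):
--             return 'low'
--         return 'medium'
--     elif analyzer_name == 'test':
--         if any(word in issue_lower for word in ['failed', 'error', 'broken']):
--             return 'high'
--         elif any(word in issue_lower for word in ['missing', 'coverage']):
--             return 'medium'
--         return 'low'
--
--     return 'medium'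
-- ===== SOURCE B (Python) =====
-- # Min-rank reduction: scan ALL keywords of the analyzer once, keeping the
-- # lowest-ranked match in an accumulator; no early return / first-match chain.
-- # Correct because within each analyzer all keywords of the same rank carry the
-- # same severity, so "first matching group" == "minimum rank among all matches".
-- KEYWORDS = {
--     'security':    [('critical', 0, 'critical'), ('high', 0, 'critical'),
--                     ('severe', 0, 'critical'), ('medium', 1, 'medium'),
--                     ('moderate', 1, 'medium')],
--     'performance': [('critical', 0, 'high'), ('severe', 0, 'high'),
--                     ('blocking', 0, 'high'), ('slow', 1, 'medium'),
--                     ('inefficient', 1, 'medium')],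
--     'quality':     [('error', 0, 'high'), ('critical', 0, 'high'),
--                     ('fatal', 0, 'high'), ('warning', 1, 'low'),
--                     ('style', 1, 'low')],
--     'test':        [('failed', 0, 'high'), ('error', 0, 'high'),
--                     ('broken', 0, 'high'), ('missing', 1, 'medium'),
--                     ('coverage', 1, 'medium')],
-- }
-- DEFAULTS = {'security': 'high', 'performance': 'low', 'quality': 'medium', 'test': 'low'}
--
--
-- def _determine_issue_severity(issue: str, analyzer_name: str) -> str:
--     issue_lower = issue.lower()
--     best_rank = 2
--     best_sev = DEFAULTS.get(analyzer_name, 'medium')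
--     for kw, rank, sev in KEYWORDS.get(analyzer_name, ()):
--         if rank < best_rank and kw in issue_lower:
--             best_rank, best_sev = rank, sev
--     return best_sev
-- ===== Notes on version B (the rewrite author's own statement) =====
-- stated objective: alternative
-- what changed: Replaced A's early-return if/elif keyword-group chains with a single accumulator pass over a flat per-analyzer keyword list that keeps the lowest-ranked match (min-rank reduction instead of first-match branching).
import Mathlib
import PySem

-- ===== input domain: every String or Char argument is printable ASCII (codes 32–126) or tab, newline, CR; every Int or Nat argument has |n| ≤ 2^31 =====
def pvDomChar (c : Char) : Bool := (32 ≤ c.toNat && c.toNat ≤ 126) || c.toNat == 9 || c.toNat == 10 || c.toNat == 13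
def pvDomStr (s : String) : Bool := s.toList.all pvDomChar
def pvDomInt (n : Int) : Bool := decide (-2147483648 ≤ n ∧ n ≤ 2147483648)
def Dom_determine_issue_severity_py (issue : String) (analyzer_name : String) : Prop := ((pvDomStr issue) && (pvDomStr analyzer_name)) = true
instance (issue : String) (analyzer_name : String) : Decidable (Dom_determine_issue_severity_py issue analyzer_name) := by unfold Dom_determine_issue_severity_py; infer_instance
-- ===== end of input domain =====

-- B replaces A's early-return if/elif keyword chains with a single accumulator pass over a
-- flat per-analyzer keyword list, keeping the lowest-ranked match (objective: alternative).

-- ===== PORT A =====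
def determine_issue_severity_py (issue : String) (analyzer_name : String) : String :=
  let issue_lower := PySem.Str.lower issue
  if analyzer_name == "security" then
    if ["critical", "high", "severe"].any (fun word => PySem.Str.isIn word issue_lower) then
      "critical"
    else if ["medium", "moderate"].any (fun word => PySem.Str.isIn word issue_lower) then
      "medium"
    else "high"
  else if analyzer_name == "performance" then
    if ["critical", "severe", "blocking"].any (fun word => PySem.Str.isIn word issue_lower) then
      "high"
    else if ["slow", "inefficient"].any (fun word => PySem.Str.isIn word issue_lower) then
      "medium"
    else "low"
  else if analyzer_name == "quality" then
    if ["error", "critical", "fatal"].any (fun word => PySem.Str.isIn word issue_lower) then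
      "high"
    else if ["warning", "style"].any (fun word => PySem.Str.isIn word issue_lower) then
      "low"
    else "medium"
  else if analyzer_name == "test" then
    if ["failed", "error", "broken"].any (fun word => PySem.Str.isIn word issue_lower) then
      "high"
    else if ["missing", "coverage"].any (fun word => PySem.Str.isIn word issue_lower) then
      "medium"
    else "low"
  else "medium"

-- ===== PORT B =====
def pvKeywords : PySem.Dict String (List (String × Int × String)) :=
  PySem.Dict.ofList
    [ ("security",    [("critical", 0, "critical"), ("high", 0, "critical"),
                       ("severe", 0, "critical"), ("medium", 1, "medium"),
                       ("moderate", 1, "medium")]),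
      ("performance", [("critical", 0, "high"), ("severe", 0, "high"),
                       ("blocking", 0, "high"), ("slow", 1, "medium"),
                       ("inefficient", 1, "medium")]),
      ("quality",     [("error", 0, "high"), ("critical", 0, "high"),
                       ("fatal", 0, "high"), ("warning", 1, "low"),
                       ("style", 1, "low")]),
      ("test",        [("failed", 0, "high"), ("error", 0, "high"),
                       ("broken", 0, "high"), ("missing", 1, "medium"),
                       ("coverage", 1, "medium")]) ]

def pvDefaults : PySem.Dict String String :=
  PySem.Dict.ofList
    [ ("security", "high"), ("performance", "low"), ("quality", "medium"), ("test", "low") ]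

def determine_issue_severity_py_alt (issue : String) (analyzer_name : String) : String :=
  let issue_lower := PySem.Str.lower issue
  let init : Int × String := (2, (pvDefaults.get? analyzer_name).getD "medium")
  let best := ((pvKeywords.get? analyzer_name).getD []).foldl
    (fun acc krs =>
      if krs.2.1 < acc.1 ∧ PySem.Str.isIn krs.1 issue_lower then (krs.2.1, krs.2.2) else acc)
    init
  best.2

-- ===== PRECONDITION & SPEC =====
def Spec_determine_issue_severity_py (issue : String) (analyzer_name : String) (out : String) : Prop := out = determine_issue_severity_py_alt issue analyzer_name
instance (issue : String) (analyzer_name : String) (out : String) : Decidable (Spec_determine_issue_severity_py issue analyzer_name out) := by unfold Spec_determine_issue_severity_py; infer_instance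

-- ===== CLAIM (what is proved, stated in full; the proofs are below) =====
def Claim_equal_determine_issue_severity_py : Prop := ∀ (issue : String) (analyzer_name : String), Dom_determine_issue_severity_py issue analyzer_name → Spec_determine_issue_severity_py issue analyzer_name (determine_issue_severity_py issue analyzer_name)

-- ===== LEMMAS AND PROOFS =====

-- The accumulator fold over a 3+2 flat keyword list equals the two-tier first-match chain.
theorem pvFold2 (il : String) (k1 k2 k3 k4 k5 s0 s1 d : String) :
    (List.foldl (fun (acc : Int × String) (krs : String × Int × String) =>
        if krs.2.1 < acc.1 ∧ PySem.Str.isIn krs.1 il then (krs.2.1, krs.2.2) else acc)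
      (2, d) [(k1, 0, s0), (k2, 0, s0), (k3, 0, s0), (k4, 1, s1), (k5, 1, s1)]).2 =
    if PySem.Str.isIn k1 il || PySem.Str.isIn k2 il || PySem.Str.isIn k3 il then s0
    else if PySem.Str.isIn k4 il || PySem.Str.isIn k5 il then s1 else d := by
  by_cases h1 : PySem.Chars.isIn k1.toList il.toList = true <;>
  by_cases h2 : PySem.Chars.isIn k2.toList il.toList = true <;>
  by_cases h3 : PySem.Chars.isIn k3.toList il.toList = true <;>
  by_cases h4 : PySem.Chars.isIn k4.toList il.toList = true <;>
  by_cases h5 : PySem.Chars.isIn k5.toList il.toList = true <;>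
    simp [List.foldl, PySem.Str.isIn, h1, h2, h3, h4, h5]

theorem pvKeywords_miss (a : String) (h1 : a ≠ "security") (h2 : a ≠ "performance")
    (h3 : a ≠ "quality") (h4 : a ≠ "test") : pvKeywords.get? a = none := by
  have e1 : ("security" == a) = false := by simp [Ne.symm h1]
  have e2 : ("performance" == a) = false := by simp [Ne.symm h2]
  have e3 : ("quality" == a) = false := by simp [Ne.symm h3]
  have e4 : ("test" == a) = false := by simp [Ne.symm h4]
  simp [pvKeywords, PySem.Dict.get?, PySem.Dict.ofList, PySem.Dict.empty,
    PySem.Dict.update, PySem.Dict.insert, e1, e2, e3, e4]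

theorem pvDefaults_miss (a : String) (h1 : a ≠ "security") (h2 : a ≠ "performance")
    (h3 : a ≠ "quality") (h4 : a ≠ "test") : pvDefaults.get? a = none := by
  have e1 : ("security" == a) = false := by simp [Ne.symm h1]
  have e2 : ("performance" == a) = false := by simp [Ne.symm h2]
  have e3 : ("quality" == a) = false := by simp [Ne.symm h3]
  have e4 : ("test" == a) = false := by simp [Ne.symm h4]
  simp [pvDefaults, PySem.Dict.get?, PySem.Dict.ofList, PySem.Dict.empty,
    PySem.Dict.update, PySem.Dict.insert, e1, e2, e3, e4]

-- ===== VERDICT (by name: the statement is the Claim_ definition above) =====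
set_option maxHeartbeats 1000000 in
theorem determine_issue_severity_py_spec : Claim_equal_determine_issue_severity_py := by
  intro issue analyzer_name _
  unfold Spec_determine_issue_severity_py determine_issue_severity_py determine_issue_severity_py_alt
  by_cases hs : analyzer_name = "security"
  · subst hs
    rw [show pvKeywords.get? "security" = some [("critical", 0, "critical"),
          ("high", 0, "critical"), ("severe", 0, "critical"), ("medium", 1, "medium"),
          ("moderate", 1, "medium")] from rfl,
        show pvDefaults.get? "security" = some "high" from rfl]
    simp only [Option.getD_some, pvFold2]
    split_ifs <;> simp_all
  · by_cases hp : analyzer_name = "performance"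
    · subst hp
      rw [show pvKeywords.get? "performance" = some [("critical", 0, "high"),
            ("severe", 0, "high"), ("blocking", 0, "high"), ("slow", 1, "medium"),
            ("inefficient", 1, "medium")] from rfl,
          show pvDefaults.get? "performance" = some "low" from rfl]
      simp only [Option.getD_some, pvFold2]
      split_ifs <;> simp_all
    · by_cases hq : analyzer_name = "quality"
      · subst hq
        rw [show pvKeywords.get? "quality" = some [("error", 0, "high"),
              ("critical", 0, "high"), ("fatal", 0, "high"), ("warning", 1, "low"),
              ("style", 1, "low")] from rfl,
            show pvDefaults.get? "quality" = some "medium" from rfl]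
        simp only [Option.getD_some, pvFold2]
        split_ifs <;> simp_all
      · by_cases ht : analyzer_name = "test"
        · subst ht
          rw [show pvKeywords.get? "test" = some [("failed", 0, "high"),
                ("error", 0, "high"), ("broken", 0, "high"), ("missing", 1, "medium"),
                ("coverage", 1, "medium")] from rfl,
              show pvDefaults.get? "test" = some "low" from rfl]
          simp only [Option.getD_some, pvFold2]
          split_ifs <;> simp_all
        · rw [pvKeywords_miss _ hs hp hq ht, pvDefaults_miss _ hs hp hq ht]
          simp [hs, hp, hq, ht]
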